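-- pv_equiv track=rewrite | github.com/cdubwisdom/AoC | Solutions/AoCDay3.py | occurrence_rates
-- ===== SOURCE A (Python) =====
-- def occurrence_rates(data, i):
--     zero_occurrence_rate = 0
--     one_occurrence_rate = 0
--     for j in data:
--         if j[i] == "0":
--             zero_occurrence_rate+=1
--         elif j[i] == "1":
--             one_occurrence_rate+=1
--
--     return zero_occurrence_rate, one_occurrence_rate
-- ===== SOURCE B (Python) =====
-- def occurrence_rates(data, i):
--     column = [row[i] for row in data]
--     return column.count("0"), column.count("1")
-- ===== Notes on version B (the rewrite author's own statement) =====
-- stated objective: idiomatic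
-- what changed: B is staged: it first materialises the i-th column as a list, then answers with two list.count library calls, replacing A's single loop with two branch-updated accumulators.
import Mathlib
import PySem

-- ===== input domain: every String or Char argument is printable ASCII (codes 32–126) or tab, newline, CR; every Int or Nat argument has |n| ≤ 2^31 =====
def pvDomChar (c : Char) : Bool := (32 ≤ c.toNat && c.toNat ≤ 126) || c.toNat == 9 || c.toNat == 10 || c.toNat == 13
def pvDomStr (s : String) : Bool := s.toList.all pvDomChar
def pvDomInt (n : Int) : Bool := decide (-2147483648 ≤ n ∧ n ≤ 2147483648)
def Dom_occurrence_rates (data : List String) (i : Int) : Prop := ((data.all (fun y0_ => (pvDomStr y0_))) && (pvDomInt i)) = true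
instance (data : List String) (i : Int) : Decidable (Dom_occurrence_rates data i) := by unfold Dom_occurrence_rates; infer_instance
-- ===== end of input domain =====

-- B stages the work: it first extracts the i-th column as a list, then answers with two
-- list.count calls, instead of A's single loop updating two accumulators via if/elif;
-- objective: idiomatic (same O(n) cost).

-- ===== PORT A =====
-- A's loop: two integer accumulators, if/elif on j[i] (none = IndexError, excluded by Pre_).
def occurrence_rates (data : List String) (i : Int) : Int × Int :=
  data.foldl (fun zo j =>
    match PySem.Str.pyGet? j i with
    | some c => if c = '0' then (zo.1 + 1, zo.2) else if c = '1' then (zo.1, zo.2 + 1) else zo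
    | none => zo) (0, 0)

-- ===== PORT B =====
-- B: column = [row[i] for row in data]; return column.count("0"), column.count("1").
-- (row[i] ported as pyGet?; inside Pre_ every entry is 'some'.)
def occurrence_rates_alt (data : List String) (i : Int) : Int × Int :=
  let column := data.map (fun row => PySem.Str.pyGet? row i)
  ((PySem.List.count column (some '0') : Int), (PySem.List.count column (some '1') : Int))

-- ===== PRECONDITION & SPEC =====
-- Pre_ excludes exactly the inputs where Python's row[i] raises IndexError (some row too short).
def Pre_occurrence_rates (data : List String) (i : Int) : Prop :=
  ∀ s ∈ data, PySem.Raise.InRange s.toList.length i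
instance (data : List String) (i : Int) : Decidable (Pre_occurrence_rates data i) := by
  unfold Pre_occurrence_rates; infer_instance
def pvWitness_occurrence_rates : List String × Int := (["010", "110", "011"], 1)

def Spec_occurrence_rates (data : List String) (i : Int) (out : Int × Int) : Prop := out = occurrence_rates_alt data i
instance (data : List String) (i : Int) (out : Int × Int) : Decidable (Spec_occurrence_rates data i out) := by unfold Spec_occurrence_rates; infer_instance

-- ===== CLAIM =====
def Claim_equal_occurrence_rates : Prop := ∀ (data : List String) (i : Int), Dom_occurrence_rates data i → Pre_occurrence_rates data i → Spec_occurrence_rates data i (occurrence_rates data i)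

-- ===== LEMMAS AND PROOFS =====

-- A's fold, started anywhere, adds the two counts of the column to the start state.
theorem occurrence_rates_fold (i : Int) (data : List String) :
    ∀ (z o : Int),
      data.foldl (fun zo j =>
        match PySem.Str.pyGet? j i with
        | some c => if c = '0' then (zo.1 + 1, zo.2) else if c = '1' then (zo.1, zo.2 + 1) else zo
        | none => zo) (z, o)
      = (z + ((data.map (fun row => PySem.Str.pyGet? row i)).count (some '0') : Int),
         o + ((data.map (fun row => PySem.Str.pyGet? row i)).count (some '1') : Int)) := by
  induction data with
  | nil => intro z o; simp
  | cons s rest ih =>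
    intro z o
    simp only [List.foldl_cons, List.map_cons]
    cases h : PySem.Str.pyGet? s i with
    | none =>
      simp only [h]
      rw [ih z o]
      simp [List.count_cons]
    | some c =>
      by_cases h0 : c = '0'
      · subst h0
        simp only [h, reduceIte]
        rw [ih (z + 1) o]
        simp [List.count_cons]
        omega
      · by_cases h1 : c = '1'
        · subst h1
          simp only [h, if_neg h0, reduceIte]
          rw [ih z (o + 1)]
          simp [List.count_cons]
          omega
        · simp only [h, if_neg h0, if_neg h1]
          rw [ih z o]
          have e0 : (some c == some '0') = false := by simp [h0]
          have e1 : (some c == some '1') = false := by simp [h1]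
          simp [List.count_cons, e0, e1]

-- ===== VERDICT =====
theorem occurrence_rates_spec : Claim_equal_occurrence_rates := by
  intro data i _ _
  unfold Spec_occurrence_rates occurrence_rates occurrence_rates_alt
  rw [occurrence_rates_fold i data 0 0]
  simp [PySem.List.count_eq]
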